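-- pv_equiv track=rewrite | github.com/briny-fish/text-matching-use-GCN | dataproce.py | assign_sentences_to_concepts
-- ===== SOURCE A (Python) =====
-- EMPTY_VERTEX_NAME = ""
--
-- def assign_sentences_to_concepts(sentences, concepts):
--     """
--     Assign a list of sentences to different concept communities.
--     :param sentences: a list of sentences
--     :param concepts: a list of concepts.
--     :return: a dictionary of (concept_name, sentence index list)
--     """
--     concept_sentidxs = {}
--     concept_sentidxs[EMPTY_VERTEX_NAME] = []
--     assigned_sentidxs = []
--     for concept in concepts:
--         concept_sentidxs[concept] = []
--         for i in range(len(sentences)-1):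
--             words = sentences[i]
--             if concept in words:
--                 concept_sentidxs[concept].append(i)
--                 assigned_sentidxs.append(i)
--
--     concept_sentidxs[EMPTY_VERTEX_NAME] = [x for x in range(len(sentences)-1)
--                                            if x not in assigned_sentidxs]
--     concept_sentidxs["TITLE"]=[len(sentences)-1]
--     return concept_sentidxs
-- ===== SOURCE B (Python) =====
-- EMPTY_VERTEX_NAME = ""
--
-- def assign_sentences_to_concepts(sentences, concepts):
--     """Inverted-index re-implementation: one pass over the sentences builds a
--     word -> sentence-index map, so each concept is a single dictionary lookup."""
--     n = len(sentences)
--     word_idxs = {}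
--     for i in range(n - 1):
--         for w in set(sentences[i]):
--             word_idxs.setdefault(w, []).append(i)
--     result = {EMPTY_VERTEX_NAME: []}
--     assigned = set()
--     for c in concepts:
--         idxs = word_idxs.get(c, [])
--         result[c] = list(idxs)
--         assigned.update(idxs)
--     result[EMPTY_VERTEX_NAME] = [i for i in range(n - 1) if i not in assigned]
--     result["TITLE"] = [n - 1]
--     return result
-- ===== Notes on version B (the rewrite author's own statement) =====
-- stated objective: faster
-- what changed: Replaces the concept-by-concept rescans of all sentences (and the list membership test for assigned indices) by a single inverted index word->sentence-indices built in one pass plus a set of assigned indices.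
import Mathlib
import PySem

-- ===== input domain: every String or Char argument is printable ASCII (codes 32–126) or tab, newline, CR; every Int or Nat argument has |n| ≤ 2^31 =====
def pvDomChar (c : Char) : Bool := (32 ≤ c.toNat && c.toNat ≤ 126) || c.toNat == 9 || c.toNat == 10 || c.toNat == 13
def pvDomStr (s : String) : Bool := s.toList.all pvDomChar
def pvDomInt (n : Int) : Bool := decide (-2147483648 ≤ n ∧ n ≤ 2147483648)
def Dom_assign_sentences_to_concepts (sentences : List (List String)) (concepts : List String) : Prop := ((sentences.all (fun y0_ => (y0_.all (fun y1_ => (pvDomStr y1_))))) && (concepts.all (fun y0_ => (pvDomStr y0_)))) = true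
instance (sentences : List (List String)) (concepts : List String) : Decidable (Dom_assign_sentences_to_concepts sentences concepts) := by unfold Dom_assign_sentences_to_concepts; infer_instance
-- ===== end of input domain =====

-- B replaces A's per-concept rescans of all sentences by a one-pass inverted index (word -> sentence
-- indices) and a set of assigned indices; the equivalence below is exact on the whole domain.

-- ===== PORT A =====
def assign_sentences_to_concepts (sentences : List (List String)) (concepts : List String) : List (String × List Int) :=
  let n : Int := (sentences.length : Int)
  let init : PySem.Dict String (List Int) := PySem.Dict.empty.insert "" []
  let st :=
    concepts.foldl
      (fun (st : PySem.Dict String (List Int) × List Int) concept =>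
        (PySem.List.pyRange 0 (n - 1) 1).foldl
          (fun st i =>
            -- sentences[i]: i comes from range(len(sentences)-1), always in range
            if concept ∈ (PySem.List.pyGet? sentences i).getD []
            then (st.1.modify concept [] (· ++ [i]), st.2 ++ [i])
            else st)
          (st.1.insert concept [], st.2))
      (init, ([] : List Int))
  let unassigned := (PySem.List.pyRange 0 (n - 1) 1).filter (fun x => decide (x ∉ st.2))
  ((st.1.insert "" unassigned).insert "TITLE" [n - 1]).items

-- ===== PORT B =====
def assign_sentences_to_concepts_alt (sentences : List (List String)) (concepts : List String) : List (String × List Int) :=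
  let n : Int := (sentences.length : Int)
  let word_idxs : PySem.Dict String (List Int) :=
    (PySem.List.pyRange 0 (n - 1) 1).foldl
      (fun wi i =>
        -- sentences[i]: i comes from range(n-1), always in range; set(sentences[i]) dedups
        (PySem.Set.ofList ((PySem.List.pyGet? sentences i).getD [])).foldl
          (fun wi w => wi.modify w [] (· ++ [i])) wi)
      PySem.Dict.empty
  let st :=
    concepts.foldl
      (fun (st : PySem.Dict String (List Int) × PySem.Set Int) c =>
        (st.1.insert c (word_idxs.getD c []), PySem.Set.update st.2 (word_idxs.getD c [])))
      (PySem.Dict.empty.insert "" [], PySem.Set.empty)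
  let unassigned := (PySem.List.pyRange 0 (n - 1) 1).filter (fun i => !(PySem.Set.contains st.2 i))
  ((st.1.insert "" unassigned).insert "TITLE" [n - 1]).items

-- ===== PRECONDITION & SPEC =====
def Spec_assign_sentences_to_concepts (sentences : List (List String)) (concepts : List String) (out : List (String × List Int)) : Prop := out = assign_sentences_to_concepts_alt sentences concepts
instance (sentences : List (List String)) (concepts : List String) (out : List (String × List Int)) : Decidable (Spec_assign_sentences_to_concepts sentences concepts out) := by unfold Spec_assign_sentences_to_concepts; infer_instance

-- ===== CLAIM (what is proved, stated in full; the proofs are below) =====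
def Claim_equal_assign_sentences_to_concepts : Prop := ∀ (sentences : List (List String)) (concepts : List String), Dom_assign_sentences_to_concepts sentences concepts → Spec_assign_sentences_to_concepts sentences concepts (assign_sentences_to_concepts sentences concepts)

-- ===== LEMMAS AND PROOFS =====

-- the indices a concept c collects over the index list l, in order
def pvCollect (sentences : List (List String)) (l : List Int) (c : String) : List Int :=
  l.filter (fun i => decide (c ∈ (PySem.List.pyGet? sentences i).getD []))

-- filtering a Nodup list for one element
theorem pv_filter_nodup {α : Type} [DecidableEq α] (l : List α) (c : α) (h : l.Nodup) :
    l.filter (fun w => w == c) = if c ∈ l then [c] else [] := by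
  induction l with
  | nil => simp
  | cons a t ih =>
    rcases List.nodup_cons.mp h with ⟨ha, ht⟩
    by_cases hac : a = c
    · subst hac
      simp [ha, ih ht]
    · simp [hac, ih ht, Ne.symm hac]

-- getD of the inner word loop of B (one sentence)
theorem pv_inner_getD (ws : List String) (hws : ws.Nodup) (wi : PySem.Dict String (List Int))
    (i : Int) (c : String) :
    (ws.foldl (fun wi w => wi.modify w [] (· ++ [i])) wi).getD c []
      = wi.getD c [] ++ (if c ∈ ws then [i] else []) := by
  have h1 : ws.foldl (fun wi w => wi.modify w [] (· ++ [i])) wi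
      = (ws.map (fun w => (w, i))).foldl (fun d p => d.modify p.1 [] (· ++ [p.2])) wi := by
    rw [List.foldl_map]
  rw [h1, PySem.Dict.getD_foldl_modify_append]
  congr 1
  rw [List.filter_map]
  have h2 : (ws.filter ((fun p => p.1 == c) ∘ fun w => (w, i))) = ws.filter (fun w => w == c) := rfl
  rw [h2, pv_filter_nodup ws c hws]
  by_cases hc : c ∈ ws <;> simp [hc]

-- getD of B's whole inverted index equals the collected list
theorem pv_widx_getD (sentences : List (List String)) (l : List Int)
    (wi : PySem.Dict String (List Int)) (c : String) :
    (l.foldl (fun wi i =>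
        (PySem.Set.ofList ((PySem.List.pyGet? sentences i).getD [])).foldl
          (fun wi w => wi.modify w [] (· ++ [i])) wi) wi).getD c []
      = wi.getD c [] ++ pvCollect sentences l c := by
  induction l generalizing wi with
  | nil => simp [pvCollect]
  | cons i t ih =>
    rw [List.foldl_cons, ih]
    rw [pv_inner_getD _ (PySem.Set.nodup_ofList _) wi i c]
    unfold pvCollect
    rw [List.filter_cons]
    by_cases hc : c ∈ (PySem.List.pyGet? sentences i).getD []
    · simp [hc, PySem.Set.mem_ofList]
    · simp [hc, PySem.Set.mem_ofList]

-- A's inner sentence loop for one concept, fully characterised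
theorem pv_A_inner (sentences : List (List String)) (l : List Int) (c : String)
    (d : PySem.Dict String (List Int)) (v acc : List Int) :
    l.foldl (fun st i =>
        if c ∈ (PySem.List.pyGet? sentences i).getD []
        then (st.1.modify c [] (· ++ [i]), st.2 ++ [i]) else st)
      (d.insert c v, acc)
      = (d.insert c (v ++ pvCollect sentences l c), acc ++ pvCollect sentences l c) := by
  induction l generalizing v acc with
  | nil => simp [pvCollect]
  | cons i t ih =>
    rw [List.foldl_cons]
    unfold pvCollect
    rw [List.filter_cons]
    by_cases hc : c ∈ (PySem.List.pyGet? sentences i).getD []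
    · have hmod : ((d.insert c v).modify c [] (· ++ [i])) = d.insert c (v ++ [i]) := by
        unfold PySem.Dict.modify
        rw [PySem.Dict.getD_insert_self, PySem.Dict.insert_insert_self]
      simp only [hc, if_true, hmod]
      rw [ih (v ++ [i]) (acc ++ [i])]
      simp [pvCollect, List.append_assoc]
    · simp only [hc, if_false]
      rw [ih v acc]
      simp [pvCollect]

-- the concept loops of A and B keep equal dictionaries and equivalent assigned sets
theorem pv_main_loop (sentences : List (List String)) (rng : List Int) (cs : List String)
    (d : PySem.Dict String (List Int)) (acc : List Int) (s : PySem.Set Int)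
    (hmem : ∀ x : Int, x ∈ acc ↔ x ∈ s) :
    (cs.foldl
        (fun (st : PySem.Dict String (List Int) × List Int) concept =>
          rng.foldl
            (fun st i =>
              if concept ∈ (PySem.List.pyGet? sentences i).getD []
              then (st.1.modify concept [] (· ++ [i]), st.2 ++ [i]) else st)
            (st.1.insert concept [], st.2))
        (d, acc)).1
      = (cs.foldl
          (fun (st : PySem.Dict String (List Int) × PySem.Set Int) c =>
            (st.1.insert c (pvCollect sentences rng c), PySem.Set.update st.2 (pvCollect sentences rng c)))
          (d, s)).1
    ∧ ∀ x : Int,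
        x ∈ (cs.foldl
          (fun (st : PySem.Dict String (List Int) × List Int) concept =>
            rng.foldl
              (fun st i =>
                if concept ∈ (PySem.List.pyGet? sentences i).getD []
                then (st.1.modify concept [] (· ++ [i]), st.2 ++ [i]) else st)
              (st.1.insert concept [], st.2))
          (d, acc)).2
        ↔ x ∈ (cs.foldl
            (fun (st : PySem.Dict String (List Int) × PySem.Set Int) c =>
              (st.1.insert c (pvCollect sentences rng c), PySem.Set.update st.2 (pvCollect sentences rng c)))
            (d, s)).2 := by
  induction cs generalizing d acc s with
  | nil => exact ⟨rfl, hmem⟩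
  | cons c t ih =>
    rw [List.foldl_cons, List.foldl_cons, pv_A_inner sentences rng c d [] acc]
    refine ih _ _ _ ?_
    intro x
    rw [List.mem_append, PySem.Set.mem_update, hmem]

-- the two 'unassigned' membership tests compute the same Bool
theorem pv_filter_bool (acc : List Int) (s : PySem.Set Int) (h : ∀ x : Int, x ∈ acc ↔ x ∈ s) (x : Int) :
    decide (x ∉ acc) = !(PySem.Set.contains s x) := by
  by_cases hx : x ∈ s
  · have hxa : x ∈ acc := (h x).mpr hx
    simp [hx, hxa]
  · have hxa : x ∉ acc := fun hxa => hx ((h x).mp hxa)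
    simp [hx, hxa]

-- ===== VERDICT (by name: the statement is the Claim_ definition above) =====
theorem assign_sentences_to_concepts_spec : Claim_equal_assign_sentences_to_concepts := by
  intro sentences concepts _
  unfold Spec_assign_sentences_to_concepts assign_sentences_to_concepts assign_sentences_to_concepts_alt
  set n : Int := (sentences.length : Int) with hn
  have hwidx : ∀ c : String,
      ((PySem.List.pyRange 0 (n - 1) 1).foldl (fun wi i =>
          (PySem.Set.ofList ((PySem.List.pyGet? sentences i).getD [])).foldl
            (fun wi w => wi.modify w [] (· ++ [i])) wi) PySem.Dict.empty).getD c []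
        = pvCollect sentences (PySem.List.pyRange 0 (n - 1) 1) c := by
    intro c
    have := pv_widx_getD sentences (PySem.List.pyRange 0 (n - 1) 1) PySem.Dict.empty c
    simpa using this
  have hB : (concepts.foldl
        (fun (st : PySem.Dict String (List Int) × PySem.Set Int) c =>
          (st.1.insert c (((PySem.List.pyRange 0 (n - 1) 1).foldl (fun wi i =>
              (PySem.Set.ofList ((PySem.List.pyGet? sentences i).getD [])).foldl
                (fun wi w => wi.modify w [] (· ++ [i])) wi) PySem.Dict.empty).getD c []),
           PySem.Set.update st.2 (((PySem.List.pyRange 0 (n - 1) 1).foldl (fun wi i =>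
              (PySem.Set.ofList ((PySem.List.pyGet? sentences i).getD [])).foldl
                (fun wi w => wi.modify w [] (· ++ [i])) wi) PySem.Dict.empty).getD c [])))
        (PySem.Dict.empty.insert "" [], PySem.Set.empty))
      = (concepts.foldl
          (fun (st : PySem.Dict String (List Int) × PySem.Set Int) c =>
            (st.1.insert c (pvCollect sentences (PySem.List.pyRange 0 (n - 1) 1) c),
             PySem.Set.update st.2 (pvCollect sentences (PySem.List.pyRange 0 (n - 1) 1) c)))
          (PySem.Dict.empty.insert "" [], PySem.Set.empty)) := by
    apply PySem.List.foldl_congr_mem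
    intro st c _
    rw [hwidx c]
  obtain ⟨hd, hs⟩ := pv_main_loop sentences (PySem.List.pyRange 0 (n - 1) 1) concepts
      (PySem.Dict.empty.insert "" []) [] PySem.Set.empty
      (by intro x; simp [PySem.Set.empty])
  simp only [hB]
  rw [hd]
  congr 2
  congr 1
  apply List.filter_congr
  intro x _
  exact pv_filter_bool _ _ hs x
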